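-- pv_equiv track=rewrite | github.com/kimSooHyun950921/algoritm | soohyun/python/programmers/legacy/1.py | solution
-- ===== SOURCE A (Python) =====
-- def solution(boxes):
--     pair_box = dict()
--     box_num = len(boxes)
--     for box in boxes:
--         for gift_num in box:
--             if pair_box.get(gift_num) != None:
--                 pair_box.pop(gift_num)
--             else:
--                 pair_box[gift_num] = 0
--     return len(pair_box.keys() ) // 2
-- ===== SOURCE B (Python) =====
-- def solution(boxes):
--     # Flatten all gift numbers and sort them, so equal numbers form
--     # contiguous runs; then scan the runs, tallying odd-length runs.
--     gifts = sorted(g for box in boxes for g in box)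
--     n = len(gifts)
--     unpaired = 0
--     i = 0
--     while i < n:
--         j = i
--         while j < n and gifts[j] == gifts[i]:
--             j += 1
--         if (j - i) % 2 == 1:
--             unpaired += 1
--         i = j
--     return unpaired // 2
-- ===== Notes on version B (the rewrite author's own statement) =====
-- stated objective: alternative
-- what changed: B flattens and sorts all gift numbers so equal numbers form contiguous runs, then scans the sorted list run by run and counts odd-length runs, instead of A's one-pass toggling of a currently-unmatched dict.
import Mathlib
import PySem

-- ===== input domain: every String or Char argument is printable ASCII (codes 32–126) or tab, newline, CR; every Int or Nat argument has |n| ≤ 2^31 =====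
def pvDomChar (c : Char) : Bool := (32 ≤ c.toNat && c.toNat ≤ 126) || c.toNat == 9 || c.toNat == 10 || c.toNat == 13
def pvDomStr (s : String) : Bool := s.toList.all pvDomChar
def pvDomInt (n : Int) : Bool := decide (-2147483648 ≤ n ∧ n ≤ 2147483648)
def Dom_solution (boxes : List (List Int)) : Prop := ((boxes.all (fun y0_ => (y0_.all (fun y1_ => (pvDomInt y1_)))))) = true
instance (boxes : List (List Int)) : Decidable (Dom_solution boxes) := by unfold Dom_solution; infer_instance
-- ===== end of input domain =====

-- B replaces A's one-pass toggling of a currently-unmatched dict by sorting the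
-- flattened gift numbers and scanning the sorted runs (alternative algorithm).

-- ===== PORT A =====
-- one body iteration of A's nested loop: toggle g's membership in pair_box
def togStep (d : PySem.Dict Int Int) (g : Int) : PySem.Dict Int Int :=
  if d.get? g ≠ none then d.erase g else d.insert g 0

def solution (boxes : List (List Int)) : Int :=
  let _box_num : Int := (boxes.length : Int)
  let pair_box := boxes.foldl (fun d box => box.foldl togStep d)
    (PySem.Dict.empty : PySem.Dict Int Int)
  PySem.Int.floordiv (pair_box.keys.length : Int) 2

-- ===== PORT B =====
-- the outer while loop of B: consume one maximal run gifts[i..j) at a time,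
-- adding 1 when its length j - i is odd (the inner while j advance = takeWhile/dropWhile)
def runLoop : List Int → Int
  | [] => 0
  | g :: t =>
    let run := t.takeWhile (fun x => x == g)
    let rest := t.dropWhile (fun x => x == g)
    (if (1 + run.length) % 2 == 1 then (1 : Int) else 0) + runLoop rest
termination_by s => s.length
decreasing_by
  simp only [List.length_cons]
  exact Nat.lt_succ_of_le (List.Sublist.length_le (List.dropWhile_sublist _))

def solution_alt (boxes : List (List Int)) : Int :=
  let gifts := PySem.List.sorted (boxes.flatMap id) (fun x => x) false
  PySem.Int.floordiv (runLoop gifts) 2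

-- ===== PRECONDITION & SPEC =====
def Spec_solution (boxes : List (List Int)) (out : Int) : Prop := out = solution_alt boxes
instance (boxes : List (List Int)) (out : Int) : Decidable (Spec_solution boxes out) := by unfold Spec_solution; infer_instance

-- ===== CLAIM (what is proved, stated in full; the proofs are below) =====
def Claim_equal_solution : Prop := ∀ (boxes : List (List Int)), Dom_solution boxes → Spec_solution boxes (solution boxes)

-- ===== LEMMAS AND PROOFS =====

-- the common value both loops compute: number of distinct gift numbers with odd count
def oddCard (l : List Int) : ℕ :=
  (l.toFinset.filter (fun k => Odd (l.count k))).card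

theorem oddCard_perm {l l' : List Int} (p : l.Perm l') : oddCard l = oddCard l' := by
  unfold oddCard
  rw [List.toFinset_eq_of_perm _ _ p]
  congr 1
  apply Finset.filter_congr
  intro x _
  rw [p.count_eq]

-- ---- A's side: keys of the toggle dict = distinct elements of odd count ----

theorem foldl_foldl_eq_flatMap {α β : Type} (f : β → α → β) :
    ∀ (boxes : List (List α)) (d : β),
      boxes.foldl (fun d box => box.foldl f d) d = (boxes.flatMap id).foldl f d := by
  intro boxes
  induction boxes with
  | nil => intro d; rfl
  | cons b t ih => intro d; simp [List.flatMap_cons, List.foldl_append, ih]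

theorem mem_keys_erase (d : PySem.Dict Int Int) (g k : Int) :
    g ∈ (d.erase k).keys ↔ g ∈ d.keys ∧ g ≠ k := by
  simp only [PySem.Dict.erase, PySem.Dict.keys, List.mem_map, List.mem_filter]
  constructor
  · rintro ⟨p, ⟨hp, hne⟩, rfl⟩
    exact ⟨⟨p, hp, rfl⟩, by simpa using hne⟩
  · rintro ⟨⟨p, hp, rfl⟩, hne⟩
    exact ⟨p, ⟨hp, by simpa using hne⟩, rfl⟩

theorem nodup_keys_erase (d : PySem.Dict Int Int) (k : Int) (h : d.keys.Nodup) :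
    (d.erase k).keys.Nodup := by
  have hsub : (d.erase k).keys.Sublist d.keys := by
    simpa [PySem.Dict.erase, PySem.Dict.keys] using
      (List.filter_sublist (l := d.items) (p := fun p => !p.1 == k)).map Prod.fst
  exact h.sublist hsub

theorem mem_keys_togStep (d : PySem.Dict Int Int) (a g : Int) :
    g ∈ (togStep d a).keys ↔ (if g = a then ¬ g ∈ d.keys else g ∈ d.keys) := by
  unfold togStep
  by_cases hmem : a ∈ d.keys
  · have : d.get? a ≠ none := by
      simpa [PySem.Dict.get?_eq_none_iff_not_mem_keys] using hmem
    rw [if_pos this, mem_keys_erase]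
    split_ifs with hg
    · subst hg; simp [hmem]
    · simp [hg]
  · have : ¬ d.get? a ≠ none := by
      simpa [PySem.Dict.get?_eq_none_iff_not_mem_keys] using hmem
    rw [if_neg this, PySem.Dict.mem_keys_insert]
    split_ifs with hg
    · subst hg; simp [hmem]
    · simp [hg]

theorem nodup_keys_togStep (d : PySem.Dict Int Int) (a : Int) (h : d.keys.Nodup) :
    (togStep d a).keys.Nodup := by
  unfold togStep
  split_ifs with hc
  · exact nodup_keys_erase d a h
  · exact PySem.Dict.nodup_keys_insert d a 0 h

-- invariant of A's toggle loop: key membership is parity of the count so far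
theorem mem_keys_foldl_togStep :
    ∀ (l : List Int) (d : PySem.Dict Int Int) (g : Int),
      g ∈ (l.foldl togStep d).keys ↔ Xor' (g ∈ d.keys) (Odd (l.count g)) := by
  intro l
  induction l with
  | nil => intro d g; simp [Xor', Nat.odd_iff]
  | cons a t ih =>
    intro d g
    rw [List.foldl_cons, ih, mem_keys_togStep]
    by_cases hg : g = a
    · subst hg
      rw [if_pos rfl, List.count_cons_self]
      rw [Nat.odd_add_one]
      unfold Xor'
      tauto
    · rw [if_neg hg, List.count_cons_of_ne (fun h => hg h.symm)]

theorem nodup_keys_foldl_togStep :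
    ∀ (l : List Int) (d : PySem.Dict Int Int), d.keys.Nodup → (l.foldl togStep d).keys.Nodup := by
  intro l
  induction l with
  | nil => intro d h; exact h
  | cons a t ih => intro d h; exact ih _ (nodup_keys_togStep d a h)

theorem keys_foldl_togStep_length (l : List Int) :
    (l.foldl togStep (PySem.Dict.empty : PySem.Dict Int Int)).keys.length = oddCard l := by
  have hnd : (l.foldl togStep (PySem.Dict.empty : PySem.Dict Int Int)).keys.Nodup :=
    nodup_keys_foldl_togStep l _ (by simp [PySem.Dict.keys_empty])
  have hlen : (l.foldl togStep (PySem.Dict.empty : PySem.Dict Int Int)).keys.length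
      = (l.foldl togStep (PySem.Dict.empty : PySem.Dict Int Int)).keys.toFinset.card :=
    (List.toFinset_card_of_nodup hnd).symm
  rw [hlen]
  unfold oddCard
  congr 1
  ext g
  rw [List.mem_toFinset, mem_keys_foldl_togStep, Finset.mem_filter, List.mem_toFinset]
  have hempty : g ∈ (PySem.Dict.empty : PySem.Dict Int Int).keys ↔ False := by
    simp [PySem.Dict.keys_empty]
  constructor
  · intro hx
    have hodd : Odd (l.count g) := by
      rcases hx with ⟨h1, _⟩ | ⟨h1, _⟩
      · exact absurd h1 (hempty.mp ·)
      · exact h1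
    have hpos : 0 < l.count g := by rcases hodd with ⟨m, hm⟩; omega
    exact ⟨List.count_pos_iff.mp hpos, hodd⟩
  · rintro ⟨_, hodd⟩
    exact Or.inr ⟨hodd, by simp [PySem.Dict.keys_empty]⟩

-- ---- B's side: scanning the runs of a sorted list counts odd-count elements ----

-- in a sorted list all of whose elements are ≥ g, dropping the leading g's drops all g's
theorem not_mem_dropWhile_of_sorted (g : Int) :
    ∀ (t : List Int), t.Pairwise (· ≤ ·) → (∀ x ∈ t, g ≤ x) →
      g ∉ t.dropWhile (fun x => x == g) := by
  intro t
  induction t with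
  | nil => intro _ _; simp
  | cons a t' ih =>
    intro hs hge
    rw [List.pairwise_cons] at hs
    by_cases ha : a = g
    · subst ha
      rw [List.dropWhile_cons_of_pos (by simp)]
      exact ih hs.2 (fun x hx => hge x (List.mem_cons_of_mem _ hx))
    · rw [List.dropWhile_cons_of_neg (by simp [ha])]
      intro hmem
      rcases List.mem_cons.mp hmem with h | h
      · exact ha h.symm
      · have h1 : a ≤ g := hs.1 g h
        have h2 : g ≤ a := hge a (List.mem_cons_self)
        exact ha (le_antisymm h1 h2)

theorem runLoop_sorted_eq_oddCard :
    ∀ (s : List Int), s.Pairwise (· ≤ ·) → runLoop s = (oddCard s : Int) := by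
  intro s
  induction s using runLoop.induct with
  | case1 => intro _; simp [runLoop, oddCard]
  | case2 g t rest ih =>
    intro hs
    rw [List.pairwise_cons] at hs
    have hrest : rest = t.dropWhile (fun x => x == g) := rfl
    set run := t.takeWhile (fun x => x == g) with hrun
    have hsplit : t = run ++ rest := by rw [hrun, hrest]; exact (List.takeWhile_append_dropWhile).symm
    have hrunall : ∀ x ∈ run, x = g := by
      intro x hx
      have := List.mem_takeWhile_imp (hrun ▸ hx)
      simpa using this
    have hrests : rest.Pairwise (· ≤ ·) := by
      rw [hrest]; exact hs.2.sublist (List.dropWhile_sublist _)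
    have hgrest : g ∉ rest := by
      rw [hrest]; exact not_mem_dropWhile_of_sorted g t hs.2 hs.1
    -- counts in g :: t versus rest
    have hcount_g : (g :: t).count g = 1 + run.length := by
      rw [List.count_cons_self, hsplit, List.count_append]
      have h1 : run.count g = run.length := by
        rw [List.count_eq_length]; intro x hx; exact ((hrunall x hx) ▸ rfl)
      have h2 : rest.count g = 0 := List.count_eq_zero.mpr hgrest
      omega
    have hcount_ne : ∀ x : Int, x ≠ g → (g :: t).count x = rest.count x := by
      intro x hx
      have h0 : run.count x = 0 := by
        rw [List.count_eq_zero]; intro hmem; exact hx (hrunall x hmem)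
      simp [hsplit, List.count_append, h0, Ne.symm hx]
    -- toFinset of g :: t = insert g rest.toFinset
    have hfin : (g :: t).toFinset = insert g rest.toFinset := by
      ext x
      simp only [List.mem_toFinset, List.mem_cons, hsplit, List.mem_append,
        Finset.mem_insert]
      constructor
      · rintro (h | h | h)
        · exact Or.inl h
        · exact Or.inl (hrunall x h)
        · exact Or.inr (by simpa using h)
      · rintro (h | h)
        · exact Or.inl h
        · exact Or.inr (Or.inr (by simpa using h))
    have hodd : oddCard (g :: t)
        = (if Odd (1 + run.length) then 1 else 0) + oddCard rest := by
      unfold oddCard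
      rw [hfin, Finset.filter_insert]
      have hfilter : Finset.filter (fun k => Odd ((g :: t).count k)) rest.toFinset
          = Finset.filter (fun k => Odd (rest.count k)) rest.toFinset := by
        apply Finset.filter_congr
        intro x hx
        have hxg : x ≠ g := by
          intro h; exact hgrest (h ▸ List.mem_toFinset.mp hx)
        rw [hcount_ne x hxg]
      have hgnot : g ∉ Finset.filter (fun k => Odd (rest.count k)) rest.toFinset := by
        simp [hgrest]
      rw [hcount_g]
      split_ifs with h
      · rw [hfilter, Finset.card_insert_of_notMem hgnot]; omega
      · rw [hfilter]; omega
    rw [runLoop]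
    rw [← hrun, ← hrest, hodd]
    have hih : runLoop rest = (oddCard rest : Int) := ih hrests
    have hpar : ((1 + run.length) % 2 == 1) = true ↔ Odd (1 + run.length) := by
      rw [Nat.odd_iff]; simp
    push_cast
    by_cases hp : Odd (1 + run.length)
    · rw [if_pos (hpar.mpr hp), if_pos hp, hih]
    · rw [if_neg (fun h => hp (hpar.mp h)), if_neg hp, hih]
-- ===== VERDICT (by name: the statement is the Claim_ definition above) =====
theorem solution_spec : Claim_equal_solution := by
  intro boxes _
  simp only [Spec_solution, solution, solution_alt]
  rw [foldl_foldl_eq_flatMap togStep boxes]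
  set l := boxes.flatMap id with hl
  have hsorted : (PySem.List.sorted l (fun x => x) false).Pairwise (· ≤ ·) := by
    have := PySem.List.sorted_pairwise (xs := l) (key := fun x => x)
    simpa using this
  have hperm : (PySem.List.sorted l (fun x => x) false).Perm l :=
    PySem.List.sorted_perm l (fun x => x) false
  rw [runLoop_sorted_eq_oddCard _ hsorted, oddCard_perm hperm,
    keys_foldl_togStep_length l]
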